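-- pv_equiv track=rewrite | github.com/Darius3001/mygooglefoobar | g1.py | isSubstringValid
-- ===== SOURCE A (Python) =====
-- def isSubstringValid(sub, s):
--
--     longs = s+s
--
--     for start in range(len(s)):
--
--         solution = True
--
--         for pos in range(start, len(s)+start, len(sub)):
--
--             lsub = longs[pos:pos+len(sub)]
--
--             if lsub != sub:
--                 solution = False
--                 break
--
--         if solution:
--             return True
-- ===== SOURCE B (Python) =====
-- def isSubstringValid(sub, s):
--     # One search instead of nested scans: a start works iff the block pattern
--     # sub * ceil(len(s)/len(sub)) occurs in s+s at that start, so the first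
--     # occurrence found by str.find decides everything.
--     n = len(s)
--     if n == 0:
--         return None
--     m = -(-n // len(sub))
--     idx = (s + s).find(sub * m)
--     if 0 <= idx < n:
--         return True
-- ===== Notes on version B (the rewrite author's own statement) =====
-- stated objective: faster
-- what changed: A tries every rotation start and re-scans block by block (nested loops); B performs one substring search of the repeated pattern sub*ceil(len(s)/len(sub)) in s+s and checks that the first occurrence index is below len(s).
import Mathlib
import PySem

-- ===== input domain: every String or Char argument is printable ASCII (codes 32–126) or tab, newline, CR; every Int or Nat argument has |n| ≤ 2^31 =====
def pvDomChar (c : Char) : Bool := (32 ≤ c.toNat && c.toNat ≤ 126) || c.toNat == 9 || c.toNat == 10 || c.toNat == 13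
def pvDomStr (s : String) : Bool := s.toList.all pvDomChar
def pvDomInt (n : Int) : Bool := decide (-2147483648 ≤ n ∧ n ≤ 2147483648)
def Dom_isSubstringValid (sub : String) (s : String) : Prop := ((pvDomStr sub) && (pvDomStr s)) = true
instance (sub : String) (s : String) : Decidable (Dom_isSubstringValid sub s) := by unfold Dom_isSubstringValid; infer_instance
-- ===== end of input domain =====

-- B replaces A's nested per-start block scans by a single substring search of the
-- repeated block pattern in s+s (objective: faster, one library search instead of O(n^2) scanning).

-- ===== PORT A =====
-- inner loop: for pos in range(start, len(s)+start, len(sub)): break on mismatch, else solution stays True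
def pvInnerA (subl longs : List Char) : List Int → Bool
  | [] => true
  | pos :: rest =>
    let lsub := PySem.List.slice longs (some pos) (some (pos + subl.length))
    if lsub ≠ subl then false else pvInnerA subl longs rest

-- outer loop: for start in range(len(s)): if solution: return True; falls off the end → None
def pvOuterA (subl sl longs : List Char) : List Int → Option Bool
  | [] => none
  | st :: rest =>
    if pvInnerA subl longs (PySem.List.pyRange st ((sl.length : Int) + st) (subl.length : Int)) then
      some true
    else pvOuterA subl sl longs rest

def isSubstringValid (sub : String) (s : String) : Option Bool :=
  let longs := s.toList ++ s.toList
  pvOuterA sub.toList s.toList longs (PySem.List.pyRange 0 (s.toList.length : Int) 1)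

-- ===== PORT B =====
def isSubstringValid_alt (sub : String) (s : String) : Option Bool :=
  let n := s.toList.length
  if n = 0 then none
  else
    let m : Int := -PySem.Int.floordiv (-(n : Int)) (sub.toList.length : Int)   -- -(-n // len(sub))
    let pat := (List.replicate m.toNat sub.toList).flatten                       -- sub * m
    let idx := PySem.Chars.find (s.toList ++ s.toList) pat                       -- (s+s).find(...)
    if 0 ≤ idx ∧ idx < (n : Int) then some true else none

-- ===== PRECONDITION & SPEC =====
-- Pre_ excludes only sub = "" with s ≠ "": there A's inner range(start, ·, 0) raises ValueError (step 0).
def Pre_isSubstringValid (sub : String) (s : String) : Prop := s.toList = [] ∨ sub.toList ≠ []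
instance (sub : String) (s : String) : Decidable (Pre_isSubstringValid sub s) := by
  unfold Pre_isSubstringValid; infer_instance
def pvWitness_isSubstringValid : String × String := ("ab", "abab")

def Spec_isSubstringValid (sub : String) (s : String) (out : Option Bool) : Prop := out = isSubstringValid_alt sub s
instance (sub : String) (s : String) (out : Option Bool) : Decidable (Spec_isSubstringValid sub s out) := by unfold Spec_isSubstringValid; infer_instance

-- ===== CLAIM (what is proved, stated in full; the proofs are below) =====
def Claim_equal_isSubstringValid : Prop := ∀ (sub : String) (s : String), Dom_isSubstringValid sub s → Pre_isSubstringValid sub s → Spec_isSubstringValid sub s (isSubstringValid sub s)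

-- ===== LEMMAS AND PROOFS =====

-- p ++ r is a prefix of t iff p is and r is a prefix of the rest
theorem pv_append_prefix {α : Type} (p r t : List α) :
    (p ++ r <+: t) ↔ p <+: t ∧ r <+: t.drop p.length := by
  constructor
  · rintro ⟨u, hu⟩
    subst hu
    refine ⟨⟨r ++ u, by simp⟩, ?_⟩
    rw [List.append_assoc, List.drop_left]
    exact ⟨u, rfl⟩
  · rintro ⟨hp, hr⟩
    obtain ⟨u, hu⟩ := hp
    subst hu
    simp only [List.drop_left] at hr
    obtain ⟨v, hv⟩ := hr
    exact ⟨v, by simp [← hv]⟩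

-- the repeated pattern is a prefix of t iff every block of t matches p
theorem pv_replicate_flatten_prefix (p : List Char) (m : Nat) :
    ∀ t : List Char,
      ((List.replicate m p).flatten <+: t) ↔ ∀ k < m, (t.drop (k * p.length)).take p.length = p := by
  induction m with
  | zero => intro t; simp
  | succ m ih =>
    intro t
    rw [List.replicate_succ, List.flatten_cons, pv_append_prefix, ih]
    constructor
    · rintro ⟨hp, hrest⟩ k hk
      cases k with
      | zero =>
        have := (List.prefix_iff_eq_take.mp hp).symm
        simpa using this
      | succ k =>
        have := hrest k (by omega)
        rw [List.drop_drop] at this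
        have harith : p.length + k * p.length = (k + 1) * p.length := by ring
        rwa [harith] at this
    · intro h
      have h0 := h 0 (by omega)
      simp only [Nat.zero_mul, List.drop_zero] at h0
      refine ⟨List.prefix_iff_eq_take.mpr h0.symm, ?_⟩
      intro k hk
      have := h (k + 1) (by omega)
      rw [List.drop_drop]
      have harith : (k + 1) * p.length = p.length + k * p.length := by ring
      rwa [harith] at this

-- pvInnerA is an "all blocks match" check
theorem pv_innerA_eq_all (subl longs : List Char) (poss : List Int) :
    pvInnerA subl longs poss = true ↔
      ∀ pos ∈ poss, PySem.List.slice longs (some pos) (some (pos + subl.length)) = subl := by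
  induction poss with
  | nil => simp [pvInnerA]
  | cons pos rest ih =>
    by_cases h : PySem.List.slice longs (some pos) (some ((pos : Int) + subl.length)) = subl
    · rw [show pvInnerA subl longs (pos :: rest) = pvInnerA subl longs rest by
        simp [pvInnerA, h], ih]
      constructor
      · intro hall p hp
        rcases List.mem_cons.mp hp with rfl | hp'
        · exact h
        · exact hall p hp'
      · intro hall p hp
        exact hall p (List.mem_cons_of_mem _ hp)
    · rw [show pvInnerA subl longs (pos :: rest) = false by simp [pvInnerA, h]]
      simp only [Bool.false_eq_true, false_iff]
      intro hall
      exact h (hall pos (List.mem_cons_self ..))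

-- pvOuterA returns some true iff some start in the list passes, else none
theorem pv_outerA_some_iff (subl sl longs : List Char) (sts : List Int) :
    pvOuterA subl sl longs sts = some true ↔
      ∃ st ∈ sts, pvInnerA subl longs
        (PySem.List.pyRange st ((sl.length : Int) + st) (subl.length : Int)) = true := by
  induction sts with
  | nil => simp [pvOuterA]
  | cons st rest ih =>
    simp only [pvOuterA]
    by_cases h : pvInnerA subl longs
        (PySem.List.pyRange st ((sl.length : Int) + st) (subl.length : Int)) = true
    · simp [h]
    · simp [h, ih]

theorem pv_outerA_none_or (subl sl longs : List Char) (sts : List Int) :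
    pvOuterA subl sl longs sts = none ∨ pvOuterA subl sl longs sts = some true := by
  induction sts with
  | nil => simp [pvOuterA]
  | cons st rest ih =>
    simp only [pvOuterA]
    split_ifs with h
    · right; rfl
    · exact ih

-- the per-start condition of A is exactly "the repeated pattern occurs at start"
theorem pv_inner_iff_pattern (subl longs : List Char) (n : Nat) (st : Nat)
    (hL : 0 < subl.length) (m : Nat)
    (hm : ((m : Int) - 1) * subl.length < n ∧ (n : Int) ≤ (m : Int) * subl.length) :
    pvInnerA subl longs (PySem.List.pyRange (st : Int) ((n : Int) + st) (subl.length : Int)) = true ↔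
      (List.replicate m subl).flatten <+: longs.drop st := by
  rw [pv_innerA_eq_all, pv_replicate_flatten_prefix]
  have hLpos : (0 : Int) < (subl.length : Int) := by exact_mod_cast hL
  constructor
  · intro h k hk
    have hkL : (k : Int) * subl.length < n := by
      have h1 : (k : Int) ≤ (m : Int) - 1 := by omega
      calc (k : Int) * subl.length ≤ ((m : Int) - 1) * subl.length :=
            mul_le_mul_of_nonneg_right h1 (le_of_lt hLpos)
        _ < n := hm.1
    have hmem : ((st : Int) + k * subl.length) ∈
        PySem.List.pyRange (st : Int) ((n : Int) + st) (subl.length : Int) := by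
      rw [PySem.List.mem_pyRange_iff_of_pos hLpos]
      refine ⟨le_add_of_nonneg_right (by positivity), by linarith, ⟨k, by ring⟩⟩
    have := h _ hmem
    have ha : (0:Int) ≤ (st : Int) + k * subl.length := by positivity
    have hb : (0:Int) ≤ (st : Int) + k * subl.length + subl.length := by positivity
    rw [PySem.List.slice_toNat longs ha hb] at this
    have hnat : ((st : Int) + k * subl.length).toNat = st + k * subl.length := by
      omega
    have hnat2 : ((st : Int) + ↑k * ↑subl.length + ↑subl.length).toNat
        - (st + k * subl.length) = subl.length := by
      omega
    rw [hnat, hnat2, ← List.drop_drop] at this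
    exact this
  · intro h pos hmem
    rw [PySem.List.mem_pyRange_iff_of_pos hLpos] at hmem
    obtain ⟨h1, h2, k, hk⟩ := hmem
    have hk0 : 0 ≤ k := by
      by_contra hneg
      have hkle : k ≤ -1 := by omega
      have hmul : (subl.length : Int) * k ≤ (subl.length : Int) * (-1) :=
        mul_le_mul_of_nonneg_left hkle (le_of_lt hLpos)
      have h3 : pos - st ≤ -subl.length := by rw [hk]; linarith
      linarith
    obtain ⟨kn, rfl⟩ := Int.eq_ofNat_of_zero_le hk0
    have hkn : kn < m := by
      by_contra hge
      have hge' : (m : Int) ≤ (kn : Int) := by omega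
      have hmul : (m : Int) * subl.length ≤ (kn : Int) * subl.length :=
        mul_le_mul_of_nonneg_right hge' (le_of_lt hLpos)
      have hlt : (subl.length : Int) * kn < n := by linarith [hk, h2]
      have hcomm : (kn : Int) * subl.length = (subl.length : Int) * kn := mul_comm _ _
      linarith [hm.2]
    have := h kn hkn
    have hpos : pos = (st : Int) + kn * subl.length := by
      have hcomm : (subl.length : Int) * kn = (kn : Int) * subl.length := mul_comm _ _
      linarith [hk]
    subst hpos
    have ha : (0:Int) ≤ (st : Int) + kn * subl.length := by positivity
    have hb : (0:Int) ≤ (st : Int) + kn * subl.length + subl.length := by positivity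
    rw [PySem.List.slice_toNat longs ha hb]
    have hnat : ((st : Int) + kn * subl.length).toNat = st + kn * subl.length := by
      omega
    have hnat2 : ((st : Int) + ↑kn * ↑subl.length + ↑subl.length).toNat
        - (st + kn * subl.length) = subl.length := by
      omega
    rw [hnat, hnat2, ← List.drop_drop]
    exact this

-- first-occurrence index below n iff some occurrence below n
theorem pv_find_lt_iff (longs pat : List Char) (n : Nat) :
    (0 ≤ PySem.Chars.find longs pat ∧ PySem.Chars.find longs pat < (n : Int)) ↔
      ∃ st : Nat, st < n ∧ pat <+: longs.drop st := by
  constructor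
  · rintro ⟨h0, hn⟩
    obtain ⟨hpre, -⟩ := PySem.Chars.find_spec h0
    exact ⟨(PySem.Chars.find longs pat).toNat, by omega, hpre⟩
  · rintro ⟨st, hst, hpre⟩
    have hinf : pat <:+: longs := by
      obtain ⟨u, hu⟩ := hpre
      exact ⟨longs.take st, u, by rw [List.append_assoc, hu, List.take_append_drop]⟩
    have h0 : 0 ≤ PySem.Chars.find longs pat := (PySem.Chars.find_nonneg_iff _ _).mpr hinf
    obtain ⟨-, hmin⟩ := PySem.Chars.find_spec h0
    refine ⟨h0, ?_⟩
    by_contra hge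
    exact hmin st (by omega) hpre

-- ===== VERDICT (by name: the statement is the Claim_ definition above) =====
theorem isSubstringValid_spec : Claim_equal_isSubstringValid := by
  intro sub s _ hpre
  unfold Spec_isSubstringValid isSubstringValid isSubstringValid_alt
  set subl := sub.toList with hsubl
  set sl := s.toList with hsl
  by_cases hn : sl.length = 0
  · have : sl = [] := List.length_eq_zero_iff.mp hn
    simp [this, PySem.List.pyRange_one_eq_nil, pvOuterA]
  · -- n > 0, so Pre gives subl ≠ []
    have hsub : subl ≠ [] := by
      rcases hpre with h | h
      · exact absurd (by simp [hsl, h] : sl.length = 0) hn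
      · exact h
    have hL : 0 < subl.length := List.length_pos_iff.mpr hsub
    have hLpos : (0 : Int) < (subl.length : Int) := by exact_mod_cast hL
    simp only [if_neg hn]
    set n := sl.length with hnn
    set mI : Int := -PySem.Int.floordiv (-(n : Int)) (subl.length : Int) with hmI
    have hnpos : (0 : Int) < (n : Int) := by exact_mod_cast Nat.pos_of_ne_zero hn
    have hmb : ((mI : Int) - 1) * subl.length < n ∧ (n : Int) ≤ mI * subl.length :=
      (PySem.Int.neg_floordiv_neg_eq_iff_of_pos (a := (n : Int)) hLpos (q := mI)).mp hmI.symm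
    have hm0 : 0 ≤ mI := by
      by_contra hneg
      have hle : mI * subl.length ≤ 0 :=
        mul_nonpos_of_nonpos_of_nonneg (by omega) (by positivity)
      linarith [hmb.2]
    have hmnat : (mI.toNat : Int) = mI := Int.toNat_of_nonneg hm0
    set m := mI.toNat with hmdef
    have hmb' : ((m : Int) - 1) * subl.length < n ∧ (n : Int) ≤ (m : Int) * subl.length := by
      rw [hmnat]; exact hmb
    set longs := sl ++ sl with hlongs
    set pat := (List.replicate m subl).flatten with hpat
    -- A's truth condition
    have hA : pvOuterA subl sl longs (PySem.List.pyRange 0 (n : Int) 1) = some true ↔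
        ∃ st : Nat, st < n ∧ pat <+: longs.drop st := by
      rw [pv_outerA_some_iff]
      constructor
      · rintro ⟨st, hmem, hinner⟩
        rw [PySem.List.mem_pyRange_one] at hmem
        obtain ⟨stn, rfl⟩ := Int.eq_ofNat_of_zero_le hmem.1
        refine ⟨stn, by exact_mod_cast hmem.2, ?_⟩
        exact (pv_inner_iff_pattern subl longs n stn hL m hmb').mp hinner
      · rintro ⟨st, hst, hpre'⟩
        refine ⟨(st : Int), ?_, ?_⟩
        · rw [PySem.List.mem_pyRange_one]; exact ⟨by positivity, by exact_mod_cast hst⟩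
        · exact (pv_inner_iff_pattern subl longs n st hL m hmb').mpr hpre'
    -- B's truth condition
    have hB : (if 0 ≤ PySem.Chars.find longs pat ∧ PySem.Chars.find longs pat < (n : Int)
        then (some true : Option Bool) else none) = some true ↔
        ∃ st : Nat, st < n ∧ pat <+: longs.drop st := by
      rw [← pv_find_lt_iff]
      split_ifs with h
      · simp [h]
      · simp [h]
    rcases pv_outerA_none_or subl sl longs (PySem.List.pyRange 0 (n : Int) 1) with hcase | hcase
    · rw [hcase]
      have hnex : ¬ ∃ st : Nat, st < n ∧ pat <+: longs.drop st := by
        intro hex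
        have h2 := hA.mpr hex
        rw [hcase] at h2
        simp at h2
      have h3 := mt hB.mp hnex
      split_ifs at h3 ⊢ with h
      all_goals first | rfl | exact absurd rfl h3
    · rw [hcase]
      have h2 := hB.mpr (hA.mp hcase)
      split_ifs at h2 ⊢ with h
      all_goals rfl
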